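-- pv_equiv track=rewrite | github.com/4321mona4321/Chat_with_sheets | Chat_with_sheets/app.py | extract_structured_summary
-- ===== SOURCE A (Python) =====
-- def extract_structured_summary(text):
--     lines = []
--     keywords = [
--         "Sample ID", "Patient Name", "Test Type", "Date",
--         "Screening", "Mutation", "Result", "Diagnosis"
--     ]
--     for key in keywords:
--         if key.lower() in text.lower():
--             for sentence in text.split("."):
--                 if key.lower() in sentence.lower():
--                     lines.append(f"**{key}:** {sentence.strip()}")
--                     break
--     if not lines:
--         return "*No structured summary could be extracted.*"
--     return "\n".join(lines)
-- ===== SOURCE B (Python) =====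
-- def extract_structured_summary(text):
--     keywords = [
--         "Sample ID", "Patient Name", "Test Type", "Date",
--         "Screening", "Mutation", "Result", "Diagnosis"
--     ]
--     lowkeys = [k.lower() for k in keywords]
--     found = {}
--     for sentence in text.split("."):
--         low = sentence.lower()
--         for key, lk in zip(keywords, lowkeys):
--             if key not in found and lk in low:
--                 found[key] = sentence
--     lines = [f"**{key}:** {found[key].strip()}" for key in keywords if key in found]
--     if not lines:
--         return "*No structured summary could be extracted.*"
--     return "\n".join(lines)
-- ===== Notes on version B (the rewrite author's own statement) =====
-- stated objective: alternative
-- what changed: Replaces A's per-keyword rescans of the whole text (outer substring guard plus an inner sentence scan with break per keyword) by a single pass over the sentences that records each keyword's first matching sentence in a dict, then emits the lines in keyword order.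
import Mathlib
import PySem

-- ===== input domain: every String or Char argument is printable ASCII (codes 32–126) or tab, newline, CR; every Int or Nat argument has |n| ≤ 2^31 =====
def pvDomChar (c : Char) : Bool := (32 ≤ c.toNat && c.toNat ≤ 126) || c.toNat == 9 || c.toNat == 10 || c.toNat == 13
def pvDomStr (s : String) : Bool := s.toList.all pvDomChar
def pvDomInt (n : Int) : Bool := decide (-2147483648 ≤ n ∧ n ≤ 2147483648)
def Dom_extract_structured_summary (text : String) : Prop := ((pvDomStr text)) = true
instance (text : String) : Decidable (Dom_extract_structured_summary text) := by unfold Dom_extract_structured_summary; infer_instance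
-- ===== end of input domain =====

-- B replaces A's per-keyword rescans of the text (outer guard plus inner sentence scan per keyword)
-- by one pass over the sentences recording each keyword's first matching sentence in a dict, then
-- emits the lines in keyword order (alternative decomposition, same results).

-- ===== PORT A =====
def pvKeywords : List String :=
  ["Sample ID", "Patient Name", "Test Type", "Date",
   "Screening", "Mutation", "Result", "Diagnosis"]

-- f-string "**{key}:** {sentence.strip()}"
def pvFmt (key s : String) : String :=
  String.ofList ("**".toList ++ key.toList ++ ":** ".toList ++ (PySem.Str.strip s).toList)

-- A's inner loop: 'for sentence in text.split("."): if …: lines.append(…); break'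
def pvLoopA (key : String) : List String → List String → List String
  | [], lines => lines
  | s :: rest, lines =>
    if PySem.Str.isIn (PySem.Str.lower key) (PySem.Str.lower s) then lines ++ [pvFmt key s]
    else pvLoopA key rest lines

def extract_structured_summary (text : String) : String :=
  let lines : List String := pvKeywords.foldl (fun lines key =>
    if PySem.Str.isIn (PySem.Str.lower key) (PySem.Str.lower text) then
      pvLoopA key ((PySem.Str.split? text ".").getD []) lines
    else lines) []
  if lines = [] then "*No structured summary could be extracted.*"
  else PySem.Str.join "\n" lines

-- ===== PORT B =====
def extract_structured_summary_alt (text : String) : String :=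
  let lowkeys := pvKeywords.map PySem.Str.lower
  let found : PySem.Dict String String :=
    ((PySem.Str.split? text ".").getD []).foldl (fun found s =>
      let low := PySem.Str.lower s
      (pvKeywords.zip lowkeys).foldl (fun found kl =>
        if (found.get? kl.1).isNone && PySem.Str.isIn kl.2 low then found.insert kl.1 s
        else found) found) PySem.Dict.empty
  let lines := pvKeywords.filterMap (fun key => (found.get? key).map (fun s => pvFmt key s))
  if lines = [] then "*No structured summary could be extracted.*"
  else PySem.Str.join "\n" lines

-- ===== PRECONDITION & SPEC =====
def Spec_extract_structured_summary (text : String) (out : String) : Prop := out = extract_structured_summary_alt text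
instance (text : String) (out : String) : Decidable (Spec_extract_structured_summary text out) := by unfold Spec_extract_structured_summary; infer_instance

-- ===== CLAIM (what is proved, stated in full; the proofs are below) =====
def Claim_equal_extract_structured_summary : Prop := ∀ (text : String), Dom_extract_structured_summary text → Spec_extract_structured_summary text (extract_structured_summary text)

-- ===== LEMMAS AND PROOFS =====

-- simple structural recursion computing text.split(".")
def pvSplitDot : List Char → List (List Char)
  | [] => [[]]
  | c :: rest =>
    if c = '.' then [] :: pvSplitDot rest
    else match pvSplitDot rest with
      | [] => [[c]]
      | h :: t => (c :: h) :: t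

def pvConsHead (x : List Char) : List (List Char) → List (List Char)
  | [] => [x]
  | h :: t => (x ++ h) :: t

lemma pvSplitDot_ne_nil (l : List Char) : pvSplitDot l ≠ [] := by
  cases l with
  | nil => simp [pvSplitDot]
  | cons c rest =>
    simp only [pvSplitDot]
    split
    · simp
    · split <;> simp

lemma pvSplitDot_cons' (l : List Char) : ∃ hh tt, pvSplitDot l = hh :: tt := by
  cases hsd : pvSplitDot l with
  | nil => exact absurd hsd (pvSplitDot_ne_nil l)
  | cons a b => exact ⟨a, b, rfl⟩

lemma pvGo_spec : ∀ (fuel : Nat) (l cur : List Char) (acc : List (List Char)),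
    l.length ≤ fuel →
    PySem.Chars.splitOn.go ['.'] fuel l cur acc = acc.reverse ++ pvConsHead cur.reverse (pvSplitDot l) := by
  intro fuel
  induction fuel with
  | zero =>
    intro l cur acc h
    have hl : l = [] := by cases l <;> simp_all
    subst hl
    simp [PySem.Chars.splitOn.go, pvSplitDot, pvConsHead]
  | succ n ih =>
    intro l cur acc h
    cases l with
    | nil => simp [PySem.Chars.splitOn.go, pvSplitDot, pvConsHead]
    | cons c rest =>
      by_cases hc : c = '.'
      · subst hc
        have hpre : List.isPrefixOf ['.'] ('.' :: rest) = true := by simp [List.isPrefixOf]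
        rw [PySem.Chars.splitOn.go]
        simp only [hpre, if_pos]
        rw [show List.drop (List.length ['.']) ('.' :: rest) = rest by simp]
        rw [ih rest [] (cur.reverse :: acc) (by simp at h; omega)]
        obtain ⟨hh, tt, hsp⟩ := pvSplitDot_cons' rest
        simp [pvSplitDot, hsp, pvConsHead]
      · have hpre : List.isPrefixOf ['.'] (c :: rest) = false := by
          simp [List.isPrefixOf]
          exact fun hcc => absurd hcc.symm hc
        rw [PySem.Chars.splitOn.go]
        simp only [hpre, Bool.false_eq_true, if_false]
        rw [ih rest (c :: cur) acc (by simp at h; omega)]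
        obtain ⟨hh, tt, hsp⟩ := pvSplitDot_cons' rest
        simp [pvSplitDot, hc, hsp, pvConsHead]

lemma pvSplitOn_eq (l : List Char) : PySem.Chars.splitOn l ['.'] = pvSplitDot l := by
  unfold PySem.Chars.splitOn
  rw [pvGo_spec (l.length + 1) l [] [] (by omega)]
  obtain ⟨hh, tt, hsp⟩ := pvSplitDot_cons' l
  simp [hsp, pvConsHead]

lemma pvJoin_splitDot (l : List Char) : PySem.Chars.join ['.'] (pvSplitDot l) = l := by
  induction l with
  | nil => simp [pvSplitDot, PySem.Chars.join_singleton]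
  | cons c rest ih =>
    obtain ⟨hh, tt, hsp⟩ := pvSplitDot_cons' rest
    rw [hsp] at ih
    by_cases hc : c = '.'
    · subst hc
      rw [show pvSplitDot ('.' :: rest) = [] :: pvSplitDot rest from by simp [pvSplitDot]]
      rw [hsp, PySem.Chars.join_cons_cons, ih]
      simp
    · simp only [pvSplitDot, if_neg hc, hsp]
      cases tt with
      | nil => simp only [PySem.Chars.join_singleton] at ih ⊢; simp [ih]
      | cons t1 t2 =>
        rw [PySem.Chars.join_cons_cons] at ih ⊢
        simp [← ih]

lemma pvLower_join (ps : List (List Char)) :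
    PySem.Chars.lower (PySem.Chars.join ['.'] ps) = PySem.Chars.join ['.'] (ps.map PySem.Chars.lower) := by
  have hdot : PySem.Chars.lowerChar '.' = '.' := by decide
  induction ps with
  | nil => simp [PySem.Chars.join_nil, PySem.Chars.lower]
  | cons p ps ih =>
    cases ps with
    | nil => simp [PySem.Chars.join_singleton]
    | cons q rest =>
      simp only [List.map_cons]
      rw [PySem.Chars.join_cons_cons, PySem.Chars.join_cons_cons]
      rw [← List.map_cons, ← ih]
      simp [PySem.Chars.lower, hdot]

-- an infix that avoids the separator char lies inside one side of the separator
lemma pvInfix_sep {pat a b : List Char} {c : Char} (hc : c ∉ pat) :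
    pat <:+: a ++ c :: b ↔ pat <:+: a ∨ pat <:+: b := by
  constructor
  · rintro ⟨u, v, huv⟩
    have hlen : u.length + (pat.length + v.length) = a.length + (b.length + 1) := by
      have h := congrArg List.length huv
      simpa using h
    by_cases h1 : u.length + pat.length ≤ a.length
    · left
      have hp1 : (u ++ pat) <+: (a ++ c :: b) := ⟨v, by simpa [List.append_assoc] using huv⟩
      have hp2 : a <+: (a ++ c :: b) := ⟨c :: b, rfl⟩
      have hup : (u ++ pat) <+: a :=
        List.prefix_of_prefix_length_le hp1 hp2 (by simpa using h1)
      obtain ⟨t, ht⟩ := hup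
      exact ⟨u, t, by simpa [List.append_assoc] using ht⟩
    · by_cases h2 : a.length + 1 ≤ u.length
      · right
        have hs1 : (pat ++ v) <:+ (a ++ c :: b) := ⟨u, by simpa [List.append_assoc] using huv⟩
        have hs2 : b <:+ (a ++ c :: b) := ⟨a ++ [c], by simp⟩
        have hsub : (pat ++ v) <:+ b :=
          List.suffix_of_suffix_length_le hs1 hs2 (by simp; omega)
        obtain ⟨s, hs⟩ := hsub
        exact ⟨s, v, by simpa [List.append_assoc] using hs⟩
      · exfalso
        have hu : u.length ≤ a.length := by omega
        have hip : a.length - u.length < pat.length := by omega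
        have e1 : (a ++ c :: b)[a.length]? = some c := by
          rw [List.getElem?_append_right (le_refl a.length)]
          simp
        have e2 : (u ++ (pat ++ v))[a.length]? = pat[a.length - u.length]? := by
          rw [List.getElem?_append_right hu, List.getElem?_append_left hip]
        have e3 : pat[a.length - u.length]? = some c := by
          rw [← e2]
          rw [show u ++ (pat ++ v) = a ++ c :: b by simpa [List.append_assoc] using huv]
          exact e1
        exact hc (List.mem_of_getElem? e3)
  · rintro (h | h)
    · exact h.trans ⟨[], c :: b, by simp⟩
    · exact h.trans ⟨a ++ [c], [], by simp⟩

lemma pvInfix_join {pat : List Char} (hne : pat ≠ []) (hc : '.' ∉ pat) :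
    ∀ ps : List (List Char), (pat <:+: PySem.Chars.join ['.'] ps ↔ ∃ p ∈ ps, pat <:+: p) := by
  intro ps
  induction ps with
  | nil => simp [PySem.Chars.join_nil, hne]
  | cons p ps ih =>
    cases ps with
    | nil => simp [PySem.Chars.join_singleton]
    | cons q rest =>
      rw [PySem.Chars.join_cons_cons]
      rw [show p ++ ['.'] ++ PySem.Chars.join ['.'] (q :: rest)
            = p ++ '.' :: PySem.Chars.join ['.'] (q :: rest) by simp]
      rw [pvInfix_sep hc, ih]
      simp

lemma pvSentences_eq (text : String) :
    (PySem.Str.split? text ".").getD [] = (pvSplitDot text.toList).map String.ofList := by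
  have h1 : (".".toList) = ['.'] := by decide
  simp [PySem.Str.split?, PySem.Chars.split?, h1, pvSplitOn_eq]

lemma pvGuard (key text : String)
    (h1 : PySem.Chars.lower key.toList ≠ []) (h2 : '.' ∉ PySem.Chars.lower key.toList) :
    (PySem.Str.isIn (PySem.Str.lower key) (PySem.Str.lower text) = true ↔
      ∃ s ∈ (PySem.Str.split? text ".").getD [],
        PySem.Str.isIn (PySem.Str.lower key) (PySem.Str.lower s) = true) := by
  rw [pvSentences_eq]
  simp only [PySem.Str.isIn_eq, PySem.Str.toList_lower]
  rw [PySem.Chars.isIn_iff_infix]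
  conv_lhs => rw [show text.toList = PySem.Chars.join ['.'] (pvSplitDot text.toList) from (pvJoin_splitDot text.toList).symm]
  rw [pvLower_join, pvInfix_join h1 h2]
  constructor
  · rintro ⟨p, hp, hinf⟩
    obtain ⟨q, hq, rfl⟩ := List.mem_map.mp hp
    exact ⟨String.ofList q, List.mem_map.mpr ⟨q, hq, rfl⟩,
      by rw [PySem.Chars.isIn_iff_infix]; simpa using hinf⟩
  · rintro ⟨s, hs, hinf⟩
    obtain ⟨q, hq, rfl⟩ := List.mem_map.mp hs
    rw [PySem.Chars.isIn_iff_infix] at hinf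
    exact ⟨PySem.Chars.lower q, List.mem_map.mpr ⟨q, hq, rfl⟩, by simpa using hinf⟩

lemma pvKeyFacts : ∀ key ∈ pvKeywords,
    PySem.Chars.lower key.toList ≠ [] ∧ '.' ∉ PySem.Chars.lower key.toList := by decide

-- A's inner loop appends the first matching sentence (if any)
lemma pvLoopA_eq (key : String) : ∀ (ss lines : List String),
    pvLoopA key ss lines
      = lines ++ ((ss.find? (fun s => PySem.Str.isIn (PySem.Str.lower key) (PySem.Str.lower s))).map
          (fun s => pvFmt key s)).toList := by
  intro ss
  induction ss with
  | nil => intro lines; simp [pvLoopA]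
  | cons s rest ih =>
    intro lines
    by_cases hm : PySem.Str.isIn (PySem.Str.lower key) (PySem.Str.lower s) = true
    · simp only [pvLoopA]
      rw [if_pos hm, List.find?_cons_of_pos
        (p := fun s => PySem.Str.isIn (PySem.Str.lower key) (PySem.Str.lower s)) hm]
      simp
    · simp only [pvLoopA]
      rw [if_neg hm, List.find?_cons_of_neg
        (p := fun s => PySem.Str.isIn (PySem.Str.lower key) (PySem.Str.lower s)) hm, ih]

-- A's whole keyword loop is a filterMap of "first matching sentence"
lemma pvA_fold (text : String) : ∀ (ks : List String) (acc : List String),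
    (∀ key ∈ ks, PySem.Chars.lower key.toList ≠ [] ∧ '.' ∉ PySem.Chars.lower key.toList) →
    ks.foldl (fun lines key =>
        if PySem.Str.isIn (PySem.Str.lower key) (PySem.Str.lower text) then
          pvLoopA key ((PySem.Str.split? text ".").getD []) lines
        else lines) acc
      = acc ++ ks.filterMap (fun key =>
          (((PySem.Str.split? text ".").getD []).find?
            (fun s => PySem.Str.isIn (PySem.Str.lower key) (PySem.Str.lower s))).map
          (fun s => pvFmt key s)) := by
  intro ks
  induction ks with
  | nil => intro acc _; simp
  | cons key ks ih =>
    intro acc hfacts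
    have hkey := hfacts key (by simp)
    simp only [List.foldl_cons]
    by_cases hg : PySem.Str.isIn (PySem.Str.lower key) (PySem.Str.lower text) = true
    · rw [if_pos hg, pvLoopA_eq, ih _ (fun k hk => hfacts k (by simp [hk]))]
      obtain ⟨s0, hs0mem, hs0⟩ := (pvGuard key text hkey.1 hkey.2).mp hg
      have hsome : (((PySem.Str.split? text ".").getD []).find?
          (fun s => PySem.Str.isIn (PySem.Str.lower key) (PySem.Str.lower s))).isSome = true := by
        rw [List.find?_isSome]
        exact ⟨s0, hs0mem, hs0⟩
      obtain ⟨s1, hs1⟩ := Option.isSome_iff_exists.mp hsome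
      rw [List.filterMap_cons, hs1]
      simp
    · rw [if_neg hg]
      have hnone : (((PySem.Str.split? text ".").getD []).find?
          (fun s => PySem.Str.isIn (PySem.Str.lower key) (PySem.Str.lower s))) = none := by
        rw [List.find?_eq_none]
        intro x hx hpx
        exact hg ((pvGuard key text hkey.1 hkey.2).mpr ⟨x, hx, hpx⟩)
      rw [ih _ (fun k hk => hfacts k (by simp [hk])), List.filterMap_cons, hnone]
      simp

lemma pvZip_map (l : List String) (f : String → String) :
    l.zip (l.map f) = l.map (fun a => (a, f a)) := by
  induction l with
  | nil => rfl
  | cons a l ih => simp [ih]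

-- B's inner fold over the keywords, effect on one key
lemma pvInner_get? (s key : String) : ∀ (ks : List String) (d : PySem.Dict String String),
    ((ks.foldl (fun found k =>
        if (found.get? k).isNone && PySem.Str.isIn (PySem.Str.lower k) (PySem.Str.lower s) then
          found.insert k s
        else found) d).get? key)
      = if ks.contains key && PySem.Str.isIn (PySem.Str.lower key) (PySem.Str.lower s)
            && (d.get? key).isNone
        then some s else d.get? key := by
  intro ks
  induction ks with
  | nil => intro d; simp
  | cons k ks ih =>
    intro d
    simp only [List.foldl_cons]
    by_cases hk : k = key
    · subst hk
      by_cases hm : PySem.Str.isIn (PySem.Str.lower k) (PySem.Str.lower s) = true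
      · have hmc : PySem.Chars.isIn (PySem.Chars.lower k.toList) (PySem.Chars.lower s.toList) = true := by
          simpa using hm
        by_cases hd : d.get? k = none
        · rw [if_pos (by rw [hd, hm]; rfl), ih, PySem.Dict.get?_insert_self]
          simp [hd, hmc]
        · obtain ⟨v, hv⟩ := Option.ne_none_iff_exists'.mp hd
          rw [if_neg (by rw [hv]; simp), ih]
          simp [hv]
      · have hmc : PySem.Chars.isIn (PySem.Chars.lower k.toList) (PySem.Chars.lower s.toList) = false := by
          simpa using hm
        rw [if_neg (by simp [hmc]), ih]
        simp [hmc]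
    · have hgk : (if (d.get? k).isNone && PySem.Str.isIn (PySem.Str.lower k) (PySem.Str.lower s) then
          d.insert k s else d).get? key = d.get? key := by
        split
        · exact PySem.Dict.get?_insert_of_ne d s (fun h => hk h.symm)
        · rfl
      rw [ih, hgk]
      have hke : ¬ key = k := fun h => hk h.symm
      simp [hke]

-- B's sentence fold computes the first matching sentence per keyword
lemma pvOuter_get? (key : String) (hmem : key ∈ pvKeywords) :
    ∀ (ss : List String) (d : PySem.Dict String String),
    ((ss.foldl (fun found s =>
        (pvKeywords.zip (pvKeywords.map PySem.Str.lower)).foldl (fun found kl =>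
          if (found.get? kl.1).isNone && PySem.Str.isIn kl.2 (PySem.Str.lower s) then
            found.insert kl.1 s
          else found) found) d).get? key)
      = (d.get? key).or
          (ss.find? (fun s => PySem.Str.isIn (PySem.Str.lower key) (PySem.Str.lower s))) := by
  have hkeyb : pvKeywords.contains key = true := by simpa using hmem
  intro ss
  induction ss with
  | nil => intro d; simp
  | cons s ss ih =>
    intro d
    simp only [List.foldl_cons]
    rw [ih]
    simp only [pvZip_map, List.foldl_map]
    rw [pvInner_get? s key pvKeywords d]
    by_cases hm : PySem.Str.isIn (PySem.Str.lower key) (PySem.Str.lower s) = true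
    · have hmc : PySem.Chars.isIn (PySem.Chars.lower key.toList) (PySem.Chars.lower s.toList) = true := by
        simpa using hm
      rw [List.find?_cons_of_pos
        (p := fun s => PySem.Str.isIn (PySem.Str.lower key) (PySem.Str.lower s)) hm]
      cases hd : d.get? key with
      | some v => simp
      | none => simp [hmc, hmem]
    · have hmc : PySem.Chars.isIn (PySem.Chars.lower key.toList) (PySem.Chars.lower s.toList) = false := by
        simpa using hm
      rw [List.find?_cons_of_neg
        (p := fun s => PySem.Str.isIn (PySem.Str.lower key) (PySem.Str.lower s)) hm]
      simp [hmc]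

-- the two line lists coincide
lemma pvLines_eq (text : String) :
    (pvKeywords.foldl (fun lines key =>
        if PySem.Str.isIn (PySem.Str.lower key) (PySem.Str.lower text) then
          pvLoopA key ((PySem.Str.split? text ".").getD []) lines
        else lines) [])
      = pvKeywords.filterMap (fun key =>
          ((((PySem.Str.split? text ".").getD []).foldl (fun found s =>
              (pvKeywords.zip (pvKeywords.map PySem.Str.lower)).foldl (fun found kl =>
                if (found.get? kl.1).isNone && PySem.Str.isIn kl.2 (PySem.Str.lower s) then
                  found.insert kl.1 s
                else found) found) PySem.Dict.empty).get? key).map (fun s => pvFmt key s)) := by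
  rw [pvA_fold text pvKeywords [] pvKeyFacts, List.nil_append]
  refine Eq.symm (List.filterMap_congr fun key hkmem => ?_)
  rw [pvOuter_get? key hkmem, PySem.Dict.get?_empty]
  simp [Option.or]

-- ===== VERDICT (by name: the statement is the Claim_ definition above) =====
theorem extract_structured_summary_spec : Claim_equal_extract_structured_summary := by
  intro text _
  unfold Spec_extract_structured_summary
  simp only [extract_structured_summary, extract_structured_summary_alt]
  rw [pvLines_eq text]
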